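-- pv_equiv track=rewrite | github.com/Judithlll/CpdPhysics | main/functions.py | get_res_chain
-- ===== SOURCE A (Python) =====
-- def get_res_chain(res_setL):
--     newsetL = []
--     for ss in res_setL:
--         for k,nwss in enumerate(newsetL):
--             if nwss.intersection(ss):
--                 newsetL[k] = nwss.union(ss) #merges
--                 ss = None
--                 break
--
--         if ss is not None:
--             newsetL.append(ss)
--
--     return newsetL
-- ===== SOURCE B (Python) =====
-- def get_res_chain(res_setL):
--     # element -> smallest index of a group containing it; merge each set into
--     # the minimal-index intersecting group without scanning existing groups
--     groups = []
--     first_idx = {}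
--     for ss in res_setL:
--         hits = [first_idx[e] for e in ss if e in first_idx]
--         if hits:
--             t = min(hits)
--             groups[t] = groups[t].union(ss)
--             for e in ss:
--                 first_idx[e] = t
--         else:
--             groups.append(ss)
--             j = len(groups) - 1
--             for e in ss:
--                 first_idx[e] = j
--     return groups
-- ===== Notes on version B (the rewrite author's own statement) =====
-- stated objective: alternative
-- what changed: B replaces A's inner scan intersecting each new set with every existing group by a hash map from element to the smallest index of a group containing it: the target group is the minimum mapped index over the incoming set's elements, so no pass over the group list is made.
import Mathlib
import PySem

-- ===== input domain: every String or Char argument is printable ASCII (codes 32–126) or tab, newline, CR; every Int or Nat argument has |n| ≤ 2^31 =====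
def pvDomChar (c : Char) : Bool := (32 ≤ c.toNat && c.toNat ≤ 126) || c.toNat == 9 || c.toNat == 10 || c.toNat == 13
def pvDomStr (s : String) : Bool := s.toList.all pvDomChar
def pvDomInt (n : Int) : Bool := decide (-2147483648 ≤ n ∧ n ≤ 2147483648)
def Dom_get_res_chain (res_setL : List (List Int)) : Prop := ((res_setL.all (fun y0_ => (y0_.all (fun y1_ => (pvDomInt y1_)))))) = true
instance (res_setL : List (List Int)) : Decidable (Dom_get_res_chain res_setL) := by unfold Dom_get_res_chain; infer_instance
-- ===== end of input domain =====

-- B replaces A's inner scan over all existing groups by an element→first-group-index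
-- dictionary: the target group is the minimum index recorded for any element of the
-- incoming set (objective: alternative algorithm, no inner scan over the groups).

-- ===== PORT A =====
-- inner 'for k,nwss in enumerate(newsetL): if nwss.intersection(ss): newsetL[k] = nwss.union(ss); break'
def pvInterScan (ss : List Int) : List (List Int) → Option (List (List Int))
  | [] => none
  | g :: rest =>
    if PySem.Set.inter g ss ≠ [] then some (PySem.Set.union g ss :: rest)
    else
      match pvInterScan ss rest with
      | some r => some (g :: r)
      | none => none

def get_res_chain (res_setL : List (List Int)) : List (List Int) :=
  res_setL.foldl (fun newsetL ssRaw =>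
    let ss := PySem.Set.ofList ssRaw
    match pvInterScan ss newsetL with
    | some merged => merged
    | none => newsetL ++ [ss]) []

-- ===== PORT B =====
-- one step of B's loop: state = (groups, first_idx dictionary)
def pvBStep (st : List (List Int) × PySem.Dict Int Nat) (ssRaw : List Int) :
    List (List Int) × PySem.Dict Int Nat :=
  let ss := PySem.Set.ofList ssRaw
  let hits := ss.filterMap (fun e => st.2.get? e)
  match hits.min? with
  | some t =>
      (st.1.set t (PySem.Set.union (st.1.getD t []) ss),
       ss.foldl (fun d e => d.insert e t) st.2)
  | none =>
      (st.1 ++ [ss], ss.foldl (fun d e => d.insert e st.1.length) st.2)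

def get_res_chain_alt (res_setL : List (List Int)) : List (List Int) :=
  (res_setL.foldl pvBStep ([], PySem.Dict.empty)).1

-- ===== PRECONDITION & SPEC =====
def Spec_get_res_chain (res_setL : List (List Int)) (out : List (List Int)) : Prop := out = get_res_chain_alt res_setL
instance (res_setL : List (List Int)) (out : List (List Int)) : Decidable (Spec_get_res_chain res_setL out) := by unfold Spec_get_res_chain; infer_instance

-- ===== CLAIM (what is proved, stated in full; the proofs are below) =====
def Claim_equal_get_res_chain : Prop := ∀ (res_setL : List (List Int)), Dom_get_res_chain res_setL → Spec_get_res_chain res_setL (get_res_chain res_setL)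

-- ===== LEMMAS AND PROOFS =====

-- first index of a group containing e (what B's dictionary stores)
def pvFirstIdx (groups : List (List Int)) (e : Int) : Option Nat :=
  groups.findIdx? (fun g => g.contains e)

-- A's inner scan merges into the FIRST intersecting group
lemma pvInterScan_eq (ss : List Int) (groups : List (List Int)) :
    pvInterScan ss groups =
      (groups.findIdx? (fun g => !(PySem.Set.inter g ss).isEmpty)).map
        (fun k => groups.set k (PySem.Set.union (groups.getD k []) ss)) := by
  induction groups with
  | nil => simp [pvInterScan]
  | cons g rest ih =>
    by_cases h : PySem.Set.inter g ss = []
    · cases hfind : rest.findIdx? (fun g => !(PySem.Set.inter g ss).isEmpty) with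
      | none => simp [pvInterScan, h, ih, List.findIdx?_cons, hfind]
      | some k => simp [pvInterScan, h, ih, List.findIdx?_cons, hfind]
    · simp [pvInterScan, h, List.findIdx?_cons]

lemma pvMin?MapSucc (l : List Nat) : (l.map (· + 1)).min? = l.min?.map (· + 1) := by
  induction l with
  | nil => simp
  | cons x xs ih =>
    rw [List.map_cons, List.min?_cons, List.min?_cons, ih]
    cases xs.min? with
    | none => simp
    | some a =>
      simp only [Option.elim, Option.map_some]
      congr 1
      omega

-- B's minimum over the dictionary hits IS the index A's scan finds
lemma pvMinFilter (ss : List Int) (groups : List (List Int)) :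
    (ss.filterMap (pvFirstIdx groups)).min? =
      groups.findIdx? (fun g => !(PySem.Set.inter g ss).isEmpty) := by
  induction groups with
  | nil => simp [pvFirstIdx]
  | cons g rest ih =>
    by_cases h : PySem.Set.inter g ss = []
    · have hg : ∀ e ∈ ss, e ∉ g := by
        intro e hes heg
        have : e ∈ PySem.Set.inter g ss := by
          simp [PySem.Set.inter, List.mem_filter, heg, hes]
        simp [h] at this
      have hcongr : ss.filterMap (pvFirstIdx (g :: rest)) =
          ss.filterMap (fun e => (pvFirstIdx rest e).map (· + 1)) := by
        apply List.filterMap_congr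
        intro e hes
        simp [pvFirstIdx, List.findIdx?_cons, hg e hes]
      rw [hcongr, ← List.map_filterMap, pvMin?MapSucc, ih]
      simp [List.findIdx?_cons, h]
    · have ⟨e0, he0g, he0s⟩ : ∃ e ∈ g, e ∈ ss := by
        rcases List.exists_mem_of_ne_nil _ h with ⟨x, hx⟩
        have := hx
        simp [PySem.Set.inter, List.mem_filter] at this
        exact ⟨x, this.1, this.2⟩
      have h0 : (0 : Nat) ∈ ss.filterMap (pvFirstIdx (g :: rest)) := by
        rw [List.mem_filterMap]
        exact ⟨e0, he0s, by simp [pvFirstIdx, List.findIdx?_cons, he0g]⟩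
      rw [List.min?_eq_some_iff.2 ⟨h0, fun b _ => Nat.zero_le b⟩]
      simp [List.findIdx?_cons, h]

-- after 'for e in ss: d[e] = t'
lemma pvDictUpdate (ss : List Int) (t : Nat) (d : PySem.Dict Int Nat) (x : Int) :
    (ss.foldl (fun d e => d.insert e t) d).get? x = if x ∈ ss then some t else d.get? x := by
  induction ss generalizing d with
  | nil => simp
  | cons a as ih =>
    simp only [List.foldl_cons, ih, PySem.Dict.get?_insert, List.mem_cons]
    by_cases hx : x ∈ as
    · simp [hx]
    · by_cases hxa : x = a <;> simp [hx, hxa]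

lemma pvFindIdx?Congr {α : Type} (p : α → Bool) (l₁ l₂ : List α) (hlen : l₁.length = l₂.length)
    (hp : ∀ i (h1 : i < l₁.length) (h2 : i < l₂.length), p l₁[i] = p l₂[i]) :
    l₁.findIdx? p = l₂.findIdx? p := by
  induction l₁ generalizing l₂ with
  | nil => cases l₂ with
    | nil => rfl
    | cons b bs => simp at hlen
  | cons a as ih =>
    cases l₂ with
    | nil => simp at hlen
    | cons b bs =>
      have h0 : p a = p b := hp 0 (by simp) (by simp)
      have htail : as.findIdx? p = bs.findIdx? p := by
        apply ih bs (by simpa using hlen)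
        intro i h1 h2
        exact hp (i + 1) (by simpa using h1) (by simpa using h2)
      simp [List.findIdx?_cons, h0, htail]

-- updating the target group moves every element of ss to index t and nothing else
lemma pvFirstIdx_set (ss : List Int) (groups : List (List Int)) (t : Nat)
    (h : (ss.filterMap (pvFirstIdx groups)).min? = some t) (e : Int) :
    pvFirstIdx (groups.set t (PySem.Set.union (groups.getD t []) ss)) e =
      if e ∈ ss then some t else pvFirstIdx groups e := by
  obtain ⟨hmem, hlb⟩ := List.min?_eq_some_iff.1 h
  obtain ⟨e0, he0s, he0⟩ := List.mem_filterMap.1 hmem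
  obtain ⟨ht, hpe0, hfirst⟩ := List.findIdx?_eq_some_iff_getElem.1 he0
  have hlb' : ∀ x ∈ ss, ∀ j, pvFirstIdx groups x = some j → t ≤ j := by
    intro x hxs j hj
    exact hlb j (List.mem_filterMap.2 ⟨x, hxs, hj⟩)
  by_cases hes : e ∈ ss
  · simp only [hes, if_pos]
    apply List.findIdx?_eq_some_iff_getElem.2
    refine ⟨by simpa using ht, ?_, ?_⟩
    · rw [List.getElem_set_self (by simpa using ht)]
      simp [List.contains_eq_mem, PySem.Set.mem_union, hes]
    · intro j hj
      simp only [List.getElem_set_ne (by omega : t ≠ j)]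
      simp only [Bool.not_eq_true, List.contains_eq_mem, decide_eq_false_iff_not]
      intro hegj
      -- e is in groups[j] with j < t: its first index would be below t
      have hne : groups.findIdx? (fun g => g.contains e) ≠ none := by
        intro hnone
        have := List.findIdx?_eq_none_iff.1 hnone groups[j] (List.getElem_mem _)
        simp only [List.contains_eq_mem, decide_eq_false_iff_not] at this
        exact this hegj
      rcases Option.ne_none_iff_exists'.1 hne with ⟨j0, hj0⟩
      obtain ⟨hj0len, _, hj0first⟩ := List.findIdx?_eq_some_iff_getElem.1 hj0
      have hj0le : j0 ≤ j := by
        by_contra hgt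
        have hpj := hj0first j (by omega)
        simp only [List.contains_eq_mem, decide_eq_true_eq] at hpj
        exact hpj hegj
      have := hlb' e hes j0 hj0
      omega
  · rw [if_neg hes]
    unfold pvFirstIdx
    apply pvFindIdx?Congr
    · simp
    · intro i h1 h2
      by_cases hit : i = t
      · subst hit
        rw [List.getElem_set_self h1]
        rw [List.getD_eq_getElem groups [] (by simpa using h2)]
        simp only [List.contains_eq_mem, decide_eq_decide, PySem.Set.mem_union]
        constructor
        · rintro (h' | h')
          · exact h'
          · exact absurd h' hes
        · exact Or.inl
      · rw [List.getElem_set_ne (fun hh => hit hh.symm)]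

-- appending a fresh group: elements of ss get index groups.length, others keep theirs
lemma pvFirstIdx_append (ss : List Int) (groups : List (List Int))
    (h : (ss.filterMap (pvFirstIdx groups)).min? = none) (e : Int) :
    pvFirstIdx (groups ++ [ss]) e =
      if e ∈ ss then some groups.length else pvFirstIdx groups e := by
  have hnone : ∀ x ∈ ss, pvFirstIdx groups x = none := by
    have := List.min?_eq_none_iff.1 h
    intro x hx
    by_contra hne
    rcases Option.ne_none_iff_exists'.1 hne with ⟨j, hj⟩
    have : (j : Nat) ∈ ss.filterMap (pvFirstIdx groups) := List.mem_filterMap.2 ⟨x, hx, hj⟩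
    simp_all
  unfold pvFirstIdx at hnone ⊢
  rw [List.findIdx?_append]
  by_cases hes : e ∈ ss
  · rw [hnone e hes, if_pos hes, Option.none_or]
    simp [List.findIdx?_cons, hes]
  · rw [if_neg hes]
    have h2 : List.findIdx? (fun g => g.contains e) [ss] = none := by
      simp [List.findIdx?_cons, hes]
    rw [h2, Option.map_none, Option.or_none]

-- main loop invariant: B's dictionary always maps e to the first group containing it
lemma pvMain (l : List (List Int)) (groups : List (List Int)) (d : PySem.Dict Int Nat)
    (hinv : ∀ e, d.get? e = pvFirstIdx groups e) :
    l.foldl (fun newsetL ssRaw =>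
      let ss := PySem.Set.ofList ssRaw
      match pvInterScan ss newsetL with
      | some merged => merged
      | none => newsetL ++ [ss]) groups = (l.foldl pvBStep (groups, d)).1 := by
  induction l generalizing groups d with
  | nil => rfl
  | cons s rest ih =>
    simp only [List.foldl_cons]
    have hhits : (PySem.Set.ofList s).filterMap (fun e => d.get? e) =
        (PySem.Set.ofList s).filterMap (pvFirstIdx groups) :=
      List.filterMap_congr (fun e _ => hinv e)
    simp only [pvBStep, hhits]
    rw [pvInterScan_eq, ← pvMinFilter]
    cases hmin : ((PySem.Set.ofList s).filterMap (pvFirstIdx groups)).min? with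
    | some t =>
      simp only [Option.map_some]
      apply ih
      intro e
      rw [pvDictUpdate, pvFirstIdx_set _ _ _ hmin e]
      split <;> [rfl; exact hinv e]
    | none =>
      simp only [Option.map_none]
      apply ih
      intro e
      rw [pvDictUpdate, pvFirstIdx_append _ _ hmin e]
      split <;> [rfl; exact hinv e]

-- ===== VERDICT (by name: the statement is the Claim_ definition above) =====
theorem get_res_chain_spec : Claim_equal_get_res_chain := by
  intro res_setL _
  unfold Spec_get_res_chain get_res_chain get_res_chain_alt
  exact pvMain res_setL [] PySem.Dict.empty (fun e => by simp [pvFirstIdx, PySem.Dict.get?_empty])
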